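-- pv_equiv track=rewrite | github.com/leschiffres/hashcode-2022-practice-problem | src/algorithms.py | get_ingredient_preferences
-- ===== SOURCE A (Python) =====
-- def get_ingredient_preferences(clients):
--     dc = {}
--     for c in clients:
--         likes, dislikes = c
--
--         for i in likes:
--             if i not in dc:
--                 dc[i] = {'isliked': 1, 'isdisliked':0}
--             else:
--                 dc[i]['isliked'] += 1
--
--         for i in dislikes:
--             if i not in dc:
--                 dc[i] = {'isliked': 0, 'isdisliked':1}
--             else:
--                 dc[i]['isdisliked'] += 1
--     return dc
-- ===== SOURCE B (Python) =====
-- def get_ingredient_preferences(clients):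
--     liked = {}
--     for likes, _ in clients:
--         for i in likes:
--             liked[i] = liked.get(i, 0) + 1
--     disliked = {}
--     for _, dislikes in clients:
--         for i in dislikes:
--             disliked[i] = disliked.get(i, 0) + 1
--     order = dict.fromkeys(i for likes, dislikes in clients for i in likes + dislikes)
--     return {i: {'isliked': liked.get(i, 0), 'isdisliked': disliked.get(i, 0)} for i in order}
-- ===== Notes on version B (the rewrite author's own statement) =====
-- stated objective: alternative
-- what changed: Replaces A's single interleaved membership-test-and-increment loop over a dict of inner dicts by three flat phases: two plain counting passes (likes, dislikes) into separate flat counters, an ordered dedup of all ingredients via dict.fromkeys for the key order, and a final merge comprehension that reads each counter with get(i, 0).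
import Mathlib
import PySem

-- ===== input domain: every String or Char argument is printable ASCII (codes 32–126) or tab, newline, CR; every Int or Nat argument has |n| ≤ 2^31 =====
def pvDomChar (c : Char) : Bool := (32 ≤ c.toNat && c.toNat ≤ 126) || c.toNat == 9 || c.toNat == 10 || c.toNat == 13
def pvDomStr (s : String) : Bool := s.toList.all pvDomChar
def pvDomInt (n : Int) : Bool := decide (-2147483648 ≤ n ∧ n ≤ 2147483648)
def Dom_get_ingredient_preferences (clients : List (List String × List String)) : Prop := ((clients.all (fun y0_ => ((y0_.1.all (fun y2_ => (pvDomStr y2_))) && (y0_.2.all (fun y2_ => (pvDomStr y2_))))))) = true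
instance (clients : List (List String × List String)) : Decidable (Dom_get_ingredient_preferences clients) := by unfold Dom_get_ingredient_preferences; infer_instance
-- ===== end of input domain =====

-- B replaces A's single interleaved membership-and-increment loop by two flat counting
-- passes plus an ordered-dedup/merge phase (objective: alternative, same cost).

-- ===== PORT A =====
-- the inner dict literals {'isliked': a, 'isdisliked': b}
def pvInner (a b : Int) : PySem.Dict String Int :=
  PySem.Dict.ofList [("isliked", a), ("isdisliked", b)]

-- body of A's `for i in likes:` loop
def pvLikeStep (dc : PySem.Dict String (PySem.Dict String Int)) (i : String) :
    PySem.Dict String (PySem.Dict String Int) :=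
  if dc.contains i = false then dc.insert i (pvInner 1 0)
  else dc.insert i ((dc.getD i PySem.Dict.empty).modify "isliked" 0 (· + 1))

-- body of A's `for i in dislikes:` loop
def pvDislikeStep (dc : PySem.Dict String (PySem.Dict String Int)) (i : String) :
    PySem.Dict String (PySem.Dict String Int) :=
  if dc.contains i = false then dc.insert i (pvInner 0 1)
  else dc.insert i ((dc.getD i PySem.Dict.empty).modify "isdisliked" 0 (· + 1))

def get_ingredient_preferences (clients : List (List String × List String)) :
    List (String × List (String × Int)) :=
  let dc := clients.foldl
    (fun dc c => c.2.foldl pvDislikeStep (c.1.foldl pvLikeStep dc))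
    PySem.Dict.empty
  dc.items.map (fun p => (p.1, p.2.items))

-- ===== PORT B =====
def get_ingredient_preferences_alt (clients : List (List String × List String)) :
    List (String × List (String × Int)) :=
  let liked := clients.foldl
    (fun d c => c.1.foldl (fun d i => d.insert i (d.getD i 0 + 1)) d)
    (PySem.Dict.empty : PySem.Dict String Int)
  let disliked := clients.foldl
    (fun d c => c.2.foldl (fun d i => d.insert i (d.getD i 0 + 1)) d)
    (PySem.Dict.empty : PySem.Dict String Int)
  let order := PySem.List.dedup (clients.flatMap (fun c => c.1 ++ c.2))
  order.map (fun i => (i, [("isliked", liked.getD i 0), ("isdisliked", disliked.getD i 0)]))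

-- ===== PRECONDITION & SPEC =====
def Spec_get_ingredient_preferences (clients : List (List String × List String)) (out : List (String × List (String × Int))) : Prop := out = get_ingredient_preferences_alt clients
instance (clients : List (List String × List String)) (out : List (String × List (String × Int))) : Decidable (Spec_get_ingredient_preferences clients out) := by unfold Spec_get_ingredient_preferences; infer_instance

-- ===== CLAIM (what is proved, stated in full; the proofs are below) =====
def Claim_equal_get_ingredient_preferences : Prop := ∀ (clients : List (List String × List String)), Dom_get_ingredient_preferences clients → Spec_get_ingredient_preferences clients (get_ingredient_preferences clients)

-- ===== LEMMAS AND PROOFS =====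

-- invariant of A's loop: the dict lists, in first-insertion order, the two-field inner
-- dict of the like/dislike counts seen so far
def pvRep (d : PySem.Dict String (PySem.Dict String Int)) (order : List String)
    (cL cD : String → Int) : Prop :=
  order.Nodup ∧
  d.items = order.map (fun k => (k, pvInner (cL k) (cD k))) ∧
  ∀ k, k ∉ order → cL k = 0 ∧ cD k = 0

theorem pvInner_modify_liked (a b : Int) :
    (pvInner a b).modify "isliked" 0 (fun x => x + 1) = pvInner (a + 1) b := rfl

theorem pvInner_modify_disliked (a b : Int) :
    (pvInner a b).modify "isdisliked" 0 (fun x => x + 1) = pvInner a (b + 1) := rfl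

theorem pvRep_keys {d order cL cD} (h : pvRep d order cL cD) : d.keys = order := by
  show d.items.map (·.1) = order
  rw [h.2.1, List.map_map]
  simp [Function.comp_def]

theorem pvNodupAppendSingleton {order : List String} {i : String}
    (hnd : order.Nodup) (hm : i ∉ order) : (order ++ [i]).Nodup := by
  rw [List.nodup_append]
  refine ⟨hnd, List.nodup_singleton i, ?_⟩
  intro a ha b hb
  rw [List.mem_singleton] at hb
  subst hb
  exact fun he => hm (he ▸ ha)

theorem pvRep_likeStep {d order cL cD} (h : pvRep d order cL cD) (i : String) :
    pvRep (pvLikeStep d i) (PySem.Set.add order i)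
      (fun k => if k = i then cL k + 1 else cL k) cD := by
  obtain ⟨hnd, hitems, hzero⟩ := h
  have hkeys : d.keys = order := pvRep_keys ⟨hnd, hitems, hzero⟩
  by_cases hm : i ∈ order
  · -- key already present: overwrite in place
    have hc : d.contains i = true := by
      rw [PySem.Dict.contains_iff_mem_keys, hkeys]; exact hm
    have hknd : d.keys.Nodup := by rw [hkeys]; exact hnd
    have hgd : d.getD i PySem.Dict.empty = pvInner (cL i) (cD i) :=
      PySem.Dict.getD_of_mem_items d (by rw [hitems]; exact List.mem_map_of_mem hm) hknd _
    refine ⟨by rw [PySem.Set.add_of_mem hm]; exact hnd, ?_, ?_⟩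
    · rw [pvLikeStep, hc]
      simp only [Bool.true_eq_false, if_false, PySem.Set.add_of_mem hm]
      rw [PySem.Dict.items_insert_of_contains d _ hc, hitems, hgd, List.map_map]
      refine List.map_congr_left (fun k _ => ?_)
      by_cases hk : k = i
      · subst hk; simp [pvInner_modify_liked]
      · simp [hk, beq_iff_eq]
    · intro k hk
      rw [PySem.Set.add_of_mem hm] at hk
      have := hzero k hk
      have hne : k ≠ i := fun he => hk (he ▸ hm)
      simp [hne, this]
  · -- new key: append the literal inner dict
    have hc : d.contains i = false := by
      rw [← Bool.not_eq_true, PySem.Dict.contains_iff_mem_keys, hkeys]; exact hm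
    refine ⟨by rw [PySem.Set.add_of_not_mem hm]; exact pvNodupAppendSingleton hnd hm, ?_, ?_⟩
    · rw [pvLikeStep, hc]
      simp only [if_true, PySem.Set.add_of_not_mem hm]
      rw [PySem.Dict.items_insert_of_not_contains d _ hc, hitems, List.map_append]
      congr 1
      · refine List.map_congr_left (fun k hk => ?_)
        have hne : k ≠ i := fun he => hm (he ▸ hk)
        simp [hne]
      · obtain ⟨h0L, h0D⟩ := hzero i hm
        simp [h0L, h0D]
    · intro k hk
      rw [PySem.Set.add_of_not_mem hm] at hk
      have hk1 : k ∉ order := fun h' => hk (List.mem_append.mpr (Or.inl h'))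
      have hne : k ≠ i := fun he => hk (List.mem_append.mpr (Or.inr (by simp [he])))
      have := hzero k hk1
      simp [hne, this]

theorem pvRep_dislikeStep {d order cL cD} (h : pvRep d order cL cD) (i : String) :
    pvRep (pvDislikeStep d i) (PySem.Set.add order i)
      cL (fun k => if k = i then cD k + 1 else cD k) := by
  obtain ⟨hnd, hitems, hzero⟩ := h
  have hkeys : d.keys = order := pvRep_keys ⟨hnd, hitems, hzero⟩
  by_cases hm : i ∈ order
  · have hc : d.contains i = true := by
      rw [PySem.Dict.contains_iff_mem_keys, hkeys]; exact hm
    have hknd : d.keys.Nodup := by rw [hkeys]; exact hnd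
    have hgd : d.getD i PySem.Dict.empty = pvInner (cL i) (cD i) :=
      PySem.Dict.getD_of_mem_items d (by rw [hitems]; exact List.mem_map_of_mem hm) hknd _
    refine ⟨by rw [PySem.Set.add_of_mem hm]; exact hnd, ?_, ?_⟩
    · rw [pvDislikeStep, hc]
      simp only [Bool.true_eq_false, if_false, PySem.Set.add_of_mem hm]
      rw [PySem.Dict.items_insert_of_contains d _ hc, hitems, hgd, List.map_map]
      refine List.map_congr_left (fun k _ => ?_)
      by_cases hk : k = i
      · subst hk; simp [pvInner_modify_disliked]
      · simp [hk, beq_iff_eq]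
    · intro k hk
      rw [PySem.Set.add_of_mem hm] at hk
      have := hzero k hk
      have hne : k ≠ i := fun he => hk (he ▸ hm)
      simp [hne, this]
  · have hc : d.contains i = false := by
      rw [← Bool.not_eq_true, PySem.Dict.contains_iff_mem_keys, hkeys]; exact hm
    refine ⟨by rw [PySem.Set.add_of_not_mem hm]; exact pvNodupAppendSingleton hnd hm, ?_, ?_⟩
    · rw [pvDislikeStep, hc]
      simp only [if_true, PySem.Set.add_of_not_mem hm]
      rw [PySem.Dict.items_insert_of_not_contains d _ hc, hitems, List.map_append]
      congr 1
      · refine List.map_congr_left (fun k hk => ?_)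
        have hne : k ≠ i := fun he => hm (he ▸ hk)
        simp [hne]
      · obtain ⟨h0L, h0D⟩ := hzero i hm
        simp [h0L, h0D]
    · intro k hk
      rw [PySem.Set.add_of_not_mem hm] at hk
      have hk1 : k ∉ order := fun h' => hk (List.mem_append.mpr (Or.inl h'))
      have hne : k ≠ i := fun he => hk (List.mem_append.mpr (Or.inr (by simp [he])))
      have := hzero k hk1
      simp [hne, this]

theorem pvRep_likeFold (xs : List String) :
    ∀ d order cL cD, pvRep d order cL cD →
      pvRep (xs.foldl pvLikeStep d) (PySem.Set.update order xs)
        (fun k => cL k + xs.count k) cD := by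
  induction xs with
  | nil =>
    intro d order cL cD h
    have heq : (fun k => cL k + ((List.count k ([] : List String) : Nat) : Int)) = cL := by
      funext k; simp
    rw [heq]; exact h
  | cons x xs ih =>
    intro d order cL cD h
    have h' := ih _ _ _ _ (pvRep_likeStep h x)
    rw [List.foldl_cons, PySem.Set.update_cons]
    have heq : (fun k => (if k = x then cL k + 1 else cL k) + ((xs.count k : Nat) : Int))
        = (fun k => cL k + (((x :: xs).count k : Nat) : Int)) := by
      funext k
      by_cases hk : k = x
      · subst hk; simp; ring
      · rw [List.count_cons_of_ne (Ne.symm hk), if_neg hk]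
    rwa [heq] at h'

theorem pvRep_dislikeFold (xs : List String) :
    ∀ d order cL cD, pvRep d order cL cD →
      pvRep (xs.foldl pvDislikeStep d) (PySem.Set.update order xs)
        cL (fun k => cD k + xs.count k) := by
  induction xs with
  | nil =>
    intro d order cL cD h
    have heq : (fun k => cD k + ((List.count k ([] : List String) : Nat) : Int)) = cD := by
      funext k; simp
    rw [heq]; exact h
  | cons x xs ih =>
    intro d order cL cD h
    have h' := ih _ _ _ _ (pvRep_dislikeStep h x)
    rw [List.foldl_cons, PySem.Set.update_cons]
    have heq : (fun k => (if k = x then cD k + 1 else cD k) + ((xs.count k : Nat) : Int))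
        = (fun k => cD k + (((x :: xs).count k : Nat) : Int)) := by
      funext k
      by_cases hk : k = x
      · subst hk; simp; ring
      · rw [List.count_cons_of_ne (Ne.symm hk), if_neg hk]
    rwa [heq] at h'

theorem pvRep_clients (clients : List (List String × List String)) :
    ∀ d order cL cD, pvRep d order cL cD →
      pvRep (clients.foldl (fun dc c => c.2.foldl pvDislikeStep (c.1.foldl pvLikeStep dc)) d)
        (PySem.Set.update order (clients.flatMap (fun c => c.1 ++ c.2)))
        (fun k => cL k + (clients.flatMap (fun c => c.1)).count k)
        (fun k => cD k + (clients.flatMap (fun c => c.2)).count k) := by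
  induction clients with
  | nil =>
    intro d order cL cD h
    have heqL : (fun k => cL k + ((List.count k (List.flatMap (fun c => c.1) ([] : List (List String × List String))) : Nat) : Int)) = cL := by
      funext k; simp
    have heqD : (fun k => cD k + ((List.count k (List.flatMap (fun c => c.2) ([] : List (List String × List String))) : Nat) : Int)) = cD := by
      funext k; simp
    rw [heqL, heqD]; exact h
  | cons c cs ih =>
    intro d order cL cD h
    have h1 := pvRep_dislikeFold c.2 _ _ _ _ (pvRep_likeFold c.1 d order cL cD h)
    have h2 := ih _ _ _ _ h1
    rw [List.foldl_cons]
    simp only [List.flatMap_cons]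
    rw [List.append_assoc, PySem.Set.update_append, PySem.Set.update_append]
    have heqL : (fun k => cL k + ((List.count k c.1 : Nat) : Int) + ((List.count k (cs.flatMap (fun c => c.1)) : Nat) : Int))
        = (fun k => cL k + ((List.count k (c.1 ++ cs.flatMap (fun c => c.1)) : Nat) : Int)) := by
      funext k; rw [List.count_append]; push_cast; ring
    have heqD : (fun k => cD k + ((List.count k c.2 : Nat) : Int) + ((List.count k (cs.flatMap (fun c => c.2)) : Nat) : Int))
        = (fun k => cD k + ((List.count k (c.2 ++ cs.flatMap (fun c => c.2)) : Nat) : Int)) := by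
      funext k; rw [List.count_append]; push_cast; ring
    rwa [heqL, heqD] at h2

-- B's flat counting loop counts occurrences in the concatenation
theorem pvCounterFold (clients : List (List String × List String))
    (f : List String × List String → List String) (k : String) :
    ∀ d : PySem.Dict String Int,
      (clients.foldl (fun d c => (f c).foldl (fun d i => d.insert i (d.getD i 0 + 1)) d) d).getD k 0
        = d.getD k 0 + (clients.flatMap f).count k := by
  induction clients with
  | nil => intro d; simp
  | cons c cs ih =>
    intro d
    rw [List.foldl_cons, ih, PySem.Dict.getD_foldl_insert_add_one,
      List.flatMap_cons, List.count_append]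
    push_cast; ring

-- ===== VERDICT (by name: the statement is the Claim_ definition above) =====
theorem get_ingredient_preferences_spec : Claim_equal_get_ingredient_preferences := by
  intro clients _
  show _ = _
  have base : pvRep PySem.Dict.empty [] (fun _ => 0) (fun _ => 0) :=
    ⟨List.nodup_nil, rfl, fun _ _ => ⟨rfl, rfl⟩⟩
  have h := pvRep_clients clients _ _ _ _ base
  have hA : get_ingredient_preferences clients
      = ((clients.foldl (fun dc c => c.2.foldl pvDislikeStep (c.1.foldl pvLikeStep dc))
          PySem.Dict.empty).items).map (fun p => (p.1, p.2.items)) := rfl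
  have hB : get_ingredient_preferences_alt clients
      = (PySem.List.dedup (clients.flatMap (fun c => c.1 ++ c.2))).map (fun i =>
          (i, [("isliked",
                (clients.foldl (fun d c => c.1.foldl (fun d i => d.insert i (d.getD i 0 + 1)) d)
                  (PySem.Dict.empty : PySem.Dict String Int)).getD i 0),
               ("isdisliked",
                (clients.foldl (fun d c => c.2.foldl (fun d i => d.insert i (d.getD i 0 + 1)) d)
                  (PySem.Dict.empty : PySem.Dict String Int)).getD i 0)])) := rfl
  rw [hA, hB, h.2.1, List.map_map, PySem.List.dedup_eq_ofList, ← PySem.Set.update_empty]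
  refine List.map_congr_left (fun k _ => ?_)
  rw [pvCounterFold clients (fun c => c.1) k, pvCounterFold clients (fun c => c.2) k]
  rfl
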